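-- pv_equiv track=rewrite | github.com/huanghaodong1997/lc | Thumbtack/NGrams.py | count1ToKGrams
-- ===== SOURCE A (Python) =====
-- def count1ToKGrams(input, k, target):
--     input = input.split(' ')
--     n = len(input)
--     res = 0
--     for i, phrase in enumerate(input):
--         if input[i] == target:
--             res += min(n - i, k)
--     return res
-- ===== SOURCE B (Python) =====
-- def count1ToKGrams(input, k, target):
--     words = input.split(' ')
--     n = len(words)
--     cut = max(0, min(n, n - k))
--     res = k * words[:cut].count(target)
--     for j, w in enumerate(reversed(words[cut:]), 1):
--         if w == target:
--             res += j
--     return res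
-- ===== Notes on version B (the rewrite author's own statement) =====
-- stated objective: alternative
-- what changed: B splits the word list at cut = max(0, min(n, n-k)) into a head whose targets each contribute exactly k (one count() of the head slice) and a tail walked in reverse with enumerate(..., 1) where a target at reverse-position j contributes exactly j, eliminating A's per-element min over an index loop of the whole list.
import Mathlib
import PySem

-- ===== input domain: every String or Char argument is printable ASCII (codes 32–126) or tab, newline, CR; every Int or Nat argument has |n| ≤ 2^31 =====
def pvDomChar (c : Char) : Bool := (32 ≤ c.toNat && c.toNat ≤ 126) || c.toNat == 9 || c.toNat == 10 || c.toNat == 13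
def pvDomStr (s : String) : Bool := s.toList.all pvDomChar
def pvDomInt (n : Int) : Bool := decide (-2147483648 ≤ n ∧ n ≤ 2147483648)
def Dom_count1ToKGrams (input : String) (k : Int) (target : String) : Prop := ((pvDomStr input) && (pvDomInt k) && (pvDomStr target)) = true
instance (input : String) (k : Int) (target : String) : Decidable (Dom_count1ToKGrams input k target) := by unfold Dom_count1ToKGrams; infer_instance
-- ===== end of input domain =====

-- B splits the words at cut = max(0,min(n,n-k)): head targets contribute k via one count(), tail targets at reverse-position j contribute j — no per-element min (alternative decomposition, same cost).

-- ===== PORT A =====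
def count1ToKGrams (input : String) (k : Int) (target : String) : Int :=
  let ws := (PySem.Str.split? input " ").getD []
  let n : Int := PySem.List.len ws
  (PySem.List.enumerate ws 0).foldl
    (fun res p => if PySem.List.pyGetD ws p.1 "" == target then res + min (n - p.1) k else res) 0

-- ===== PORT B =====
def count1ToKGrams_alt (input : String) (k : Int) (target : String) : Int :=
  let words := (PySem.Str.split? input " ").getD []
  let n : Int := PySem.List.len words
  let cut : Int := max 0 (min n (n - k))
  let res : Int := k * PySem.List.count (PySem.List.slice words none (some cut)) target
  (PySem.List.enumerate (PySem.List.slice words (some cut) none).reverse 1).foldl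
    (fun res p => if p.2 == target then res + p.1 else res) res

-- ===== PRECONDITION & SPEC =====
def Spec_count1ToKGrams (input : String) (k : Int) (target : String) (out : Int) : Prop := out = count1ToKGrams_alt input k target
instance (input : String) (k : Int) (target : String) (out : Int) : Decidable (Spec_count1ToKGrams input k target out) := by unfold Spec_count1ToKGrams; infer_instance

-- ===== CLAIM (what is proved, stated in full; the proofs are below) =====
def Claim_equal_count1ToKGrams : Prop := ∀ (input : String) (k : Int) (target : String), Dom_count1ToKGrams input k target → Spec_count1ToKGrams input k target (count1ToKGrams input k target)

-- ===== LEMMAS AND PROOFS =====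

-- a fold that conditionally adds is the initial value plus a sum
theorem pv_foldl_if_add {α : Type} (l : List α) (p : α → Bool) (g : α → Int) (a : Int) :
    l.foldl (fun acc x => if p x then acc + g x else acc) a
      = a + (l.map (fun x => if p x then g x else 0)).sum := by
  induction l generalizing a with
  | nil => simp
  | cons x xs ih =>
    simp only [List.foldl_cons, List.map_cons, List.sum_cons, ih]
    split_ifs <;> ring

-- list-sum over List.range as a Finset.range sum
theorem pv_sum_range (m : Nat) (f : Nat → Int) :
    ((List.range m).map f).sum = ∑ j ∈ Finset.range m, f j := by
  induction m with
  | zero => simp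
  | succ m ih => rw [List.range_succ, Finset.sum_range_succ]; simp [ih]

-- enumerate as a map over List.range (elements fetched with getD; in range so exact)
theorem pv_enum_eq (l : List String) (s : Int) :
    PySem.List.enumerate l s
      = (List.range l.length).map (fun (j : Nat) => ((s + (j : Int)), l.getD j "")) := by
  induction l generalizing s with
  | nil => simp [PySem.List.enumerate_nil]
  | cons x xs ih =>
    rw [PySem.List.enumerate_cons, ih, List.length_cons, List.range_succ_eq_map,
        List.map_cons, List.map_map]
    congr 1
    · simp
    · apply List.map_congr_left
      intro j _
      simp only [Function.comp_apply, List.getD_cons_succ]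
      congr 1
      push_cast; ring

-- k * count as an elementwise sum
theorem pv_count_sum (l : List String) (t : String) (k : Int) :
    k * (l.count t : Int) = (l.map (fun x => if x == t then k else 0)).sum := by
  induction l with
  | nil => simp
  | cons x xs ih =>
    simp only [List.count_cons, List.map_cons, List.sum_cons]
    by_cases h : x == t
    · simp only [h, if_true, ← ih]; push_cast; ring
    · simp only [h, Bool.false_eq_true, if_false, ← ih]; push_cast; ring

-- take as a map over List.range
theorem pv_take_eq_range (xs : List String) (c : Nat) (h : c ≤ xs.length) :
    xs.take c = (List.range c).map (fun j => xs.getD j "") := by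
  induction c with
  | zero => simp
  | succ c ih =>
    have hc : c < xs.length := by omega
    rw [List.take_add_one, List.range_succ, List.map_append, ← ih (by omega)]
    simp [List.getElem?_eq_getElem hc]

-- the reversed-enumerate sum, by structural induction on the list
theorem pv_rev_sum (l : List String) (t : String) :
    ((PySem.List.enumerate l.reverse 1).map (fun p => if p.2 == t then p.1 else 0)).sum
      = ∑ j ∈ Finset.range l.length,
          (if l.getD j "" == t then ((l.length : Int) - (j : Int)) else 0) := by
  induction l with
  | nil => simp [PySem.List.enumerate_nil]
  | cons x xs ih =>
    rw [List.reverse_cons, PySem.List.enumerate_append, List.map_append, List.sum_append, ih]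
    rw [List.length_cons, Finset.sum_range_succ']
    have h1 : ∀ j ∈ Finset.range xs.length,
        (if (x :: xs).getD (j+1) "" == t then (((xs.length + 1 : Nat) : Int) - ((j+1 : Nat) : Int)) else 0)
          = (if xs.getD j "" == t then ((xs.length : Int) - (j : Int)) else 0) := by
      intro j _
      rw [List.getD_cons_succ]
      split_ifs with h
      · push_cast; ring
      · rfl
    rw [Finset.sum_congr rfl h1]
    have h2 : PySem.List.enumerate [x] (1 + (xs.reverse.length : Int))
        = [((1 + (xs.length : Int)), x)] := by
      simp [PySem.List.enumerate_cons, PySem.List.enumerate_nil]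
    rw [h2]
    simp only [List.map_cons, List.map_nil, List.sum_cons, List.sum_nil, add_zero,
      List.getD_cons_zero]
    split_ifs with h
    · push_cast; ring
    · simp

-- the core identity, on the word list
theorem pv_core (ws : List String) (k : Int) (target : String) :
    (PySem.List.enumerate ws 0).foldl
      (fun res p => if PySem.List.pyGetD ws p.1 "" == target
        then res + min ((PySem.List.len ws) - p.1) k else res) 0
    = (PySem.List.enumerate
        (PySem.List.slice ws (some (max 0 (min (PySem.List.len ws) ((PySem.List.len ws) - k)))) none).reverse 1).foldl
        (fun res p => if p.2 == target then res + p.1 else res)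
        (k * PySem.List.count
          (PySem.List.slice ws none (some (max 0 (min (PySem.List.len ws) ((PySem.List.len ws) - k))))) target) := by
  have hn : PySem.List.len ws = (ws.length : Int) := PySem.List.len_eq ws
  rw [hn]
  set L := ws.length with hL
  set cut : Int := max 0 (min (L : Int) ((L : Int) - k)) with hcut
  have hc0 : (0 : Int) ≤ cut := le_max_left _ _
  have hcL : cut ≤ (L : Int) := max_le (Int.natCast_nonneg L) (min_le_left _ _)
  have hcm : min (L : Int) ((L : Int) - k) ≤ cut := le_max_right _ _
  have hc : ((cut.toNat : Int)) = cut := Int.toNat_of_nonneg hc0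
  set c := cut.toNat with hcdef
  have hcle : c ≤ L := by omega
  have hsplit : (L : Int) ≤ (c : Int) ∨ (L : Int) - k ≤ (c : Int) := by
    rcases min_choice (L : Int) ((L : Int) - k) with h | h
    · left; omega
    · right; omega
  -- both slices, with the natural-number bound c
  rw [← hc, PySem.List.slice_to_natCast, PySem.List.slice_from_natCast]
  -- A side: a sum over Finset.range L
  rw [pv_foldl_if_add, pv_enum_eq ws 0, List.map_map, pv_sum_range, zero_add]
  -- B side: the tail fold as the reversed-enumerate sum
  rw [pv_foldl_if_add, pv_rev_sum, PySem.List.count_eq, pv_count_sum]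
  -- head: k * count of the take as a sum over Finset.range c
  rw [pv_take_eq_range ws c hcle, List.map_map, pv_sum_range]
  -- split A's range at c
  have hLsum : Finset.range ws.length = Finset.range (c + (L - c)) := by
    rw [← hL]; congr 1; omega
  rw [hLsum, Finset.sum_range_add]
  congr 1
  · -- head sums agree termwise: min (L - j) k = k for j < c
    apply Finset.sum_congr rfl
    intro j hj
    have hj' : j < c := Finset.mem_range.mp hj
    have hjc : ((j : Int)) < cut := by omega
    have hjk : k ≤ (L : Int) - (j : Int) := by
      rw [hcut, lt_max_iff, lt_min_iff] at hjc
      omega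
    simp only [Function.comp_apply, zero_add, PySem.List.pyGetD_natCast]
    split_ifs with h
    · exact min_eq_right hjk
    · rfl
  · -- tail sums agree termwise: min (L - (c+j)) k = L - (c+j), drop re-indexes
    have hlen : (ws.drop c).length = L - c := by simp [hL]
    rw [hlen]
    apply Finset.sum_congr rfl
    intro j hj
    have hj' : j < L - c := Finset.mem_range.mp hj
    have hget : (ws.drop c).getD j "" = ws.getD (c + j) "" := by
      rw [List.getD_eq_getElem?_getD, List.getD_eq_getElem?_getD, List.getElem?_drop]
    simp only [Function.comp_apply, zero_add, PySem.List.pyGetD_natCast, hget]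
    split_ifs with h
    · omega
    · rfl

-- ===== VERDICT (by name: the statement is the Claim_ definition above) =====
theorem count1ToKGrams_spec : Claim_equal_count1ToKGrams := by
  intro input k target _
  unfold Spec_count1ToKGrams count1ToKGrams count1ToKGrams_alt
  exact pv_core ((PySem.Str.split? input " ").getD []) k target
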